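-- pv_equiv track=rewrite | github.com/jaolito85-hash/whatsmesa | mesazap/menu_service.py | _quantity_before
-- ===== SOURCE A (Python) =====
-- NUMBER_WORDS = {
--     "um": 1,
--     "uma": 1,
--     "dois": 2,
--     "duas": 2,
--     "tres": 3,
--     "quatro": 4,
--     "cinco": 5,
--     "seis": 6,
--     "sete": 7,
--     "oito": 8,
--     "nove": 9,
--     "dez": 10,
--     "one": 1,
--     "a": 1,
--     "an": 1,
--     "two": 2,
--     "three": 3,
--     "four": 4,
--     "five": 5,
--     "six": 6,
--     "seven": 7,
--     "eight": 8,
--     "nine": 9,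
--     "ten": 10,
--     "uno": 1,
--     "una": 1,
--     "dos": 2,
--     "tres": 3,
--     "cuatro": 4,
--     "cinco": 5,
--     "seis": 6,
--     "siete": 7,
--     "ocho": 8,
--     "nueve": 9,
--     "diez": 10,
-- }
--
-- def _quantity_before(normalized_text: str, start: int) -> int:
--     before = normalized_text[:start].strip()
--     if not before:
--         return 1
--
--     tokens = before.split()
--     last_connector = max(
--         (index for index, token in enumerate(tokens) if token in {"e", "and", "y"}),
--         default=-1,
--     )
--     tail = tokens[last_connector + 1 :][-4:]
--     if not tail:
--         return 1
--
--     for token in reversed(tail):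
--         if token.isdigit():
--             return max(1, int(token))
--         if token in NUMBER_WORDS:
--             return NUMBER_WORDS[token]
--     return 1
-- ===== SOURCE B (Python) =====
-- NUMBER_WORDS = {
--     "um": 1, "uma": 1, "dois": 2, "duas": 2, "tres": 3, "quatro": 4,
--     "cinco": 5, "seis": 6, "sete": 7, "oito": 8, "nove": 9, "dez": 10,
--     "one": 1, "a": 1, "an": 1, "two": 2, "three": 3, "four": 4,
--     "five": 5, "six": 6, "seven": 7, "eight": 8, "nine": 9, "ten": 10,
--     "uno": 1, "una": 1, "dos": 2, "cuatro": 4, "siete": 7, "ocho": 8,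
--     "nueve": 9, "diez": 10,
-- }
--
--
-- def _quantity_before(normalized_text: str, start: int) -> int:
--     # Forward single pass: maintain a sliding window of the last <=4 tokens
--     # since the most recent connector, then take the last numeric value in it.
--     window = []
--     for token in normalized_text[:start].strip().split():
--         if token in ("e", "and", "y"):
--             window = []
--         else:
--             window = (window + [token])[-4:]
--     value = None
--     for token in window:
--         if token.isdigit():
--             value = max(1, int(token))
--         elif token in NUMBER_WORDS:
--             value = NUMBER_WORDS[token]
--     return 1 if value is None else value
-- ===== Notes on version B (the rewrite author's own statement) =====
-- stated objective: alternative
-- what changed: A locates the last connector via an index max over an enumerate generator, slices the tail, takes its last 4 and scans it reversed with early return; B is a forward single pass keeping a sliding window of the last <=4 tokens since the most recent connector, followed by a forward fold that keeps the last numeric value seen.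
import Mathlib
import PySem

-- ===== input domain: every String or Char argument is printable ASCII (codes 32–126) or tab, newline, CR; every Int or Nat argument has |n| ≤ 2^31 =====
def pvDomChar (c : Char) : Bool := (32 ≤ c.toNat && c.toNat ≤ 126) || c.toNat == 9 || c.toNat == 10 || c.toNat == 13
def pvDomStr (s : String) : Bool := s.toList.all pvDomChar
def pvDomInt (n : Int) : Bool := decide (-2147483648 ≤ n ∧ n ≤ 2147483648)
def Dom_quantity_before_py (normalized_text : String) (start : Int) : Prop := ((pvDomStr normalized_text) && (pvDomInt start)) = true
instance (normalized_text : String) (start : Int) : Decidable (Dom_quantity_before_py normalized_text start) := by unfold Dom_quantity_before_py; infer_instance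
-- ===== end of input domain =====

set_option maxRecDepth 8192


-- B replaces A's find-last-connector / slice-tail / reversed-scan-with-early-return by a
-- forward single pass: a sliding window of the last ≤4 tokens since the most recent
-- connector, then a forward fold keeping the last numeric value (objective: alternative).

-- shared module constant NUMBER_WORDS (dict literal, source order; later duplicate keys overwrite)
def pyNumberWords : PySem.Dict String Int := PySem.Dict.ofList
  [("um",1),("uma",1),("dois",2),("duas",2),("tres",3),("quatro",4),("cinco",5),("seis",6),
   ("sete",7),("oito",8),("nove",9),("dez",10),("one",1),("a",1),("an",1),("two",2),
   ("three",3),("four",4),("five",5),("six",6),("seven",7),("eight",8),("nine",9),("ten",10),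
   ("uno",1),("una",1),("dos",2),("tres",3),("cuatro",4),("cinco",5),("seis",6),("siete",7),
   ("ocho",8),("nueve",9),("diez",10)]

-- token in {"e", "and", "y"}
def pyIsConnector (t : String) : Bool := t == "e" || t == "and" || t == "y"

-- ===== PORT A =====
-- A's 'for token in reversed(tail)' loop (argument is tail.reverse).
-- int(token) is guarded by token.isdigit(), so ofStr? is some; .getD 0 is unreachable.
def quantityLoopA : List String → Int
  | [] => 1
  | t :: rest =>
    if PySem.Str.strIsdigit t then max 1 ((PySem.Int.ofStr? t).getD 0)
    else match pyNumberWords.get? t with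
      | some v => v
      | none => quantityLoopA rest

-- max((index for index, token in enumerate(tokens) if token in {...}), default=-1)
def pyLastConnector (tokens : List String) : Int :=
  (PySem.List.max? (((PySem.List.enumerate tokens 0).filter (fun q => pyIsConnector q.2)).map (·.1)) (fun i => i)).getD (-1)

def quantity_before_py (normalized_text : String) (start : Int) : Int :=
  let before := PySem.Str.strip (PySem.Str.slice normalized_text none (some start))
  if before = "" then 1
  else
    let tokens := PySem.Str.split₀ before
    let last_connector := pyLastConnector tokens
    let tail := PySem.List.slice (PySem.List.slice tokens (some (last_connector + 1)) none) (some (-4)) none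
    if tail = [] then 1 else quantityLoopA tail.reverse

-- ===== PORT B =====
-- 'window = []' / 'window = (window + [token])[-4:]' step of B's first loop
def windowStep (w : List String) (t : String) : List String :=
  if pyIsConnector t then [] else PySem.List.slice (w ++ [t]) (some (-4)) none

-- 'value = …' step of B's second loop (value : Option Int, none = Python None)
def lastValStep (v : Option Int) (t : String) : Option Int :=
  if PySem.Str.strIsdigit t then some (max 1 ((PySem.Int.ofStr? t).getD 0))
  else match pyNumberWords.get? t with
    | some x => some x
    | none => v

def quantity_before_py_alt (normalized_text : String) (start : Int) : Int :=
  let window := (PySem.Str.split₀ (PySem.Str.strip (PySem.Str.slice normalized_text none (some start)))).foldl windowStep []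
  match window.foldl lastValStep none with
  | none => 1
  | some v => v

-- ===== PRECONDITION & SPEC =====
def Spec_quantity_before_py (normalized_text : String) (start : Int) (out : Int) : Prop := out = quantity_before_py_alt normalized_text start
instance (normalized_text : String) (start : Int) (out : Int) : Decidable (Spec_quantity_before_py normalized_text start out) := by unfold Spec_quantity_before_py; infer_instance

-- ===== CLAIM (what is proved, stated in full; the proofs are below) =====
def Claim_equal_quantity_before_py : Prop := ∀ (normalized_text : String) (start : Int), Dom_quantity_before_py normalized_text start → Spec_quantity_before_py normalized_text start (quantity_before_py normalized_text start)

-- ===== LEMMAS AND PROOFS =====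

-- tokens after the last connector (A's tokens[last_connector+1:]), characterised backwards
def pvAfterConn (tokens : List String) : List String :=
  (tokens.reverse.takeWhile (fun t => !pyIsConnector t)).reverse

-- every index produced by A's generator is in [0, tokens.length)
theorem pvIdx_bound (tokens : List String) (i : Int)
    (h : i ∈ ((PySem.List.enumerate tokens 0).filter (fun q => pyIsConnector q.2)).map (·.1)) :
    0 ≤ i ∧ i < tokens.length := by
  rcases List.mem_map.1 h with ⟨p, hp, rfl⟩
  rcases (PySem.List.mem_enumerate_iff _ _ _).1 (List.mem_filter.1 hp).1 with ⟨k, hk, rfl⟩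
  simp
  omega

theorem pvLc_bound (tokens : List String) :
    -1 ≤ pyLastConnector tokens ∧ pyLastConnector tokens < tokens.length := by
  unfold pyLastConnector
  cases h : PySem.List.max? (((PySem.List.enumerate tokens 0).filter (fun q => pyIsConnector q.2)).map (·.1)) (fun i => i) with
  | none => simp; omega
  | some m =>
    have hm := PySem.List.max?_mem h
    have := pvIdx_bound tokens m hm
    simp
    omega

-- foldl of a running-max step over xs ++ [m] yields m when everything in xs is below m
theorem pvFold_last (f : Option Int → Int → Option Int)
    (hf1 : ∀ x, f none x = some x)
    (hf2 : ∀ a x, f (some a) x = if a < x then some x else some a)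
    (xs : List Int) (m : Int) (acc : Option Int) (h : ∀ x ∈ xs, x < m)
    (hacc : acc = none ∨ ∃ a, acc = some a ∧ a < m) :
    List.foldl f acc (xs ++ [m]) = some m := by
  induction xs generalizing acc with
  | nil =>
    rcases hacc with rfl | ⟨a, rfl, ha⟩
    · simp [hf1]
    · simp [hf2, ha]
  | cons x xs ih =>
    have hx : x < m := h x (by simp)
    simp only [List.cons_append, List.foldl_cons]
    refine ih _ (fun y hy => h y (List.mem_cons_of_mem _ hy)) ?_
    rcases hacc with rfl | ⟨a, rfl, ha⟩
    · right; exact ⟨x, by rw [hf1], hx⟩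
    · right
      by_cases hax : a < x
      · exact ⟨x, by rw [hf2]; simp [hax], hx⟩
      · exact ⟨a, by rw [hf2]; simp [hax], ha⟩

-- max? over xs ++ [m] is m when every element of xs is below m
theorem pvMax?_last (xs : List Int) (m : Int) (h : ∀ x ∈ xs, x < m) :
    PySem.List.max? (xs ++ [m]) (fun i => i) = some m := by
  unfold PySem.List.max?
  exact pvFold_last _ (fun x => rfl) (fun a x => rfl) xs m none h (Or.inl rfl)

-- dropping past the last connector = pvAfterConn
theorem pvDrop_lc (tokens : List String) :
    tokens.drop (pyLastConnector tokens + 1).toNat = pvAfterConn tokens := by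
  induction tokens using List.reverseRecOn with
  | nil => simp [pyLastConnector, PySem.List.enumerate_nil, pvAfterConn]
  | append_singleton init t ih =>
    have henum : PySem.List.enumerate (init ++ [t]) 0
        = PySem.List.enumerate init 0 ++ [((init.length : Int), t)] := by
      rw [PySem.List.enumerate_append]
      simp [PySem.List.enumerate_cons, PySem.List.enumerate_nil]
    by_cases hc : pyIsConnector t = true
    · have hlist : ((PySem.List.enumerate (init ++ [t]) 0).filter (fun q => pyIsConnector q.2)).map (·.1)
          = (((PySem.List.enumerate init 0).filter (fun q => pyIsConnector q.2)).map (·.1)) ++ [(init.length : Int)] := by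
        rw [henum]
        simp [hc]
      have hlc : pyLastConnector (init ++ [t]) = init.length := by
        unfold pyLastConnector
        rw [hlist, pvMax?_last _ _ (fun x hx => (pvIdx_bound init x hx).2)]
        rfl
      rw [hlc]
      have : ((init.length : Int) + 1).toNat = init.length + 1 := by omega
      rw [this]
      rw [List.drop_eq_nil_of_le (by simp)]
      simp [pvAfterConn, hc]
    · have hlist : ((PySem.List.enumerate (init ++ [t]) 0).filter (fun q => pyIsConnector q.2)).map (·.1)
          = ((PySem.List.enumerate init 0).filter (fun q => pyIsConnector q.2)).map (·.1) := by
        rw [henum]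
        simp [hc]
      have hlc : pyLastConnector (init ++ [t]) = pyLastConnector init := by
        unfold pyLastConnector
        rw [hlist]
      have hb := pvLc_bound init
      have hle : (pyLastConnector init + 1).toNat ≤ init.length := by omega
      rw [hlc, List.drop_append_of_le_length hle, ih]
      simp [pvAfterConn, hc]

-- last-four of (last-four xs ++ [t]) = last-four of (xs ++ [t])
theorem pvLastFour_append (xs : List String) (t : String) :
    PySem.List.slice (PySem.List.slice xs (some (-4)) none ++ [t]) (some (-4)) none
      = PySem.List.slice (xs ++ [t]) (some (-4)) none := by
  rw [PySem.List.slice_from_neg_ofNat xs 4 (by omega)]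
  rw [PySem.List.slice_from_neg_ofNat _ 4 (by omega)]
  rw [PySem.List.slice_from_neg_ofNat _ 4 (by omega)]
  by_cases h4 : 4 ≤ xs.length
  · have hlen : (xs.drop (xs.length - 4)).length = 4 := by simp; omega
    have h1 : (xs.drop (xs.length - 4) ++ [t]).length - 4 = 1 := by simp [hlen]
    have h2 : (xs ++ [t]).length - 4 = (xs.length - 4) + 1 := by simp; omega
    rw [h1, h2]
    rw [List.drop_append_of_le_length (by omega), List.drop_append_of_le_length (by omega)]
    rw [List.drop_drop]
  · have h0 : xs.length - 4 = 0 := by omega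
    have h1 : (xs.drop 0 ++ [t]).length - 4 = 0 := by simp; omega
    have h2 : (xs ++ [t]).length - 4 = 0 := by simp; omega
    rw [h0, h1, h2]
    simp

-- B's window fold computes the last ≤4 tokens after the last connector
theorem pvWindow_eq (tokens : List String) :
    tokens.foldl windowStep [] = PySem.List.slice (pvAfterConn tokens) (some (-4)) none := by
  induction tokens using List.reverseRecOn with
  | nil => rfl
  | append_singleton init t ih =>
    rw [List.foldl_append]
    simp only [List.foldl_cons, List.foldl_nil]
    by_cases hc : pyIsConnector t = true
    · have hafter : pvAfterConn (init ++ [t]) = [] := by simp [pvAfterConn, hc]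
      rw [hafter]
      simp only [windowStep, hc, if_true]
      decide
    · have hafter : pvAfterConn (init ++ [t]) = pvAfterConn init ++ [t] := by
        simp [pvAfterConn, hc]
      rw [hafter]
      have hstep : windowStep (List.foldl windowStep [] init) t
          = PySem.List.slice (List.foldl windowStep [] init ++ [t]) (some (-4)) none := by
        unfold windowStep; rw [if_neg (by simp [hc])]
      rw [hstep, ih]
      exact pvLastFour_append _ t
-- B's value fold on a list = A's early-return scan of the reversed list
theorem pvVal_eq (l : List String) :
    (match l.foldl lastValStep none with
     | none => (1 : Int)
     | some v => v) = quantityLoopA l.reverse := by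
  induction l using List.reverseRecOn with
  | nil => rfl
  | append_singleton init t ih =>
    rw [List.foldl_append, List.reverse_append]
    simp only [List.foldl_cons, List.foldl_nil, List.reverse_cons, List.reverse_nil,
      List.nil_append, List.singleton_append]
    rw [quantityLoopA]
    have hstep : lastValStep (List.foldl lastValStep none init) t
        = if PySem.Str.strIsdigit t then some (max 1 ((PySem.Int.ofStr? t).getD 0))
          else match pyNumberWords.get? t with
            | some x => some x
            | none => List.foldl lastValStep none init := rfl
    rw [hstep]
    by_cases hd : PySem.Str.strIsdigit t = true
    · rw [if_pos hd, if_pos hd]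
    · rw [if_neg hd, if_neg hd]
      cases hget : pyNumberWords.get? t with
      | some v => simp
      | none => simpa using ih

theorem pvEmpty_split : PySem.Str.split₀ "" = [] := by decide

-- ===== VERDICT (by name: the statement is the Claim_ definition above) =====
theorem quantity_before_py_spec : Claim_equal_quantity_before_py := by
  intro normalized_text start _
  unfold Spec_quantity_before_py quantity_before_py quantity_before_py_alt
  set before := PySem.Str.strip (PySem.Str.slice normalized_text none (some start)) with hbef
  by_cases hb : before = ""
  · simp only [hb, if_true]
    rw [pvEmpty_split]
    rfl
  · simp only [hb, if_false]
    set tokens := PySem.Str.split₀ before with htok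
    rw [pvWindow_eq tokens]
    have hb2 := pvLc_bound tokens
    have hslice : PySem.List.slice tokens (some (pyLastConnector tokens + 1)) none
        = pvAfterConn tokens := by
      rw [PySem.List.slice_from tokens (by omega : (0:Int) ≤ pyLastConnector tokens + 1)]
      exact pvDrop_lc tokens
    rw [hslice]
    set tail := PySem.List.slice (pvAfterConn tokens) (some (-4)) none with htail
    rw [← pvVal_eq tail]
    by_cases ht : tail = []
    · simp [ht]
    · simp [ht]
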